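-- pv_equiv track=rewrite | github.com/18mgdev/fAIrNews | summarizer.py | remove_dashes
-- ===== SOURCE A (Python) =====
-- def remove_dashes(text):
--     # Separar las frases del texto
--     sentences = text.split('. ')
--     cleaned_sentences = []
--
--     # Procesar cada frase
--     for sentence in sentences:
--         # Si la frase empieza con " -", quitarlo
--         if sentence.startswith('- '):
--             sentence = sentence[2:]
--         cleaned_sentences.append(sentence)
--
--     # Volver a juntar las frases
--     cleaned_text = '. '.join(cleaned_sentences)
--
--     # Si el texto original termina en un punto, asegurarse de que el resultado también lo haga
--     if text.endswith('.'):
--         cleaned_text += '.'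
--
--     return cleaned_text
-- ===== SOURCE B (Python) =====
-- def remove_dashes(text):
--     # Single left-to-right scan: drop '- ' when standing at a sentence start
--     # (string start or just after a '. ' separator), copy everything else.
--     out = []
--     i = 0
--     n = len(text)
--     start = True
--     while i < n:
--         if start and text.startswith('- ', i):
--             i += 2
--             start = False
--         elif text.startswith('. ', i):
--             out.append('. ')
--             i += 2
--             start = True
--         else:
--             out.append(text[i])
--             i += 1
--             start = False
--     cleaned_text = ''.join(out)
--     if text.endswith('.'):
--         cleaned_text += '.'
--     return cleaned_text
-- ===== Notes on version B (the rewrite author's own statement) =====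
-- stated objective: alternative
-- what changed: Replaced the split/per-sentence-loop/join pipeline with a single left-to-right state-machine scan that drops a leading dash marker at each sentence start directly, building the output in one pass without any intermediate sentence list.
import Mathlib
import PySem

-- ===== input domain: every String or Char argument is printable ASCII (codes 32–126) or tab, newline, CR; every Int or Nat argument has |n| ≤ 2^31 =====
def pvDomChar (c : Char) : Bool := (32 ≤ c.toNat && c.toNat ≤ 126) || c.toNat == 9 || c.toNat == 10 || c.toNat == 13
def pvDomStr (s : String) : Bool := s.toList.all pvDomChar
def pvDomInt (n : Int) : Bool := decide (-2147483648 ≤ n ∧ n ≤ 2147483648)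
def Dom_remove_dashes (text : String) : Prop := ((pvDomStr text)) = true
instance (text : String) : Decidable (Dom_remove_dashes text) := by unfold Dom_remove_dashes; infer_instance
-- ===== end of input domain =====

-- B replaces A's split/per-sentence-loop/join pipeline with a single left-to-right state-machine scan; same return value (objective: alternative).


-- ===== PORT A =====
def remove_dashes (text : String) : String :=
  let sentences := PySem.Chars.splitOn text.toList ['.', ' ']
  let cleaned_sentences := sentences.foldl
    (fun acc sentence =>
      let sentence := if PySem.Chars.startswith sentence ['-', ' '] then
          PySem.Chars.slice sentence (some 2) none
        else sentence
      acc ++ [sentence]) []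
  let cleaned_text := PySem.Chars.join ['.', ' '] cleaned_sentences
  let cleaned_text := if PySem.Chars.endswith text.toList ['.'] then cleaned_text ++ ['.'] else cleaned_text
  String.ofList cleaned_text

-- ===== PORT B =====
-- the while loop of Source B: `st` = the `start` flag, the list argument = text[i:]
def pvScanB : Bool → List Char → List Char
  | _, [] => []
  | st, c :: rest =>
    if st && PySem.Chars.startswith (c :: rest) ['-', ' '] then
      pvScanB false rest.tail
    else if PySem.Chars.startswith (c :: rest) ['.', ' '] then
      '.' :: ' ' :: pvScanB true rest.tail
    else
      c :: pvScanB false rest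
termination_by _ l => l.length
decreasing_by all_goals simp [List.length_tail]

def remove_dashes_alt (text : String) : String :=
  let cleaned_text := pvScanB true text.toList
  let cleaned_text := if PySem.Chars.endswith text.toList ['.'] then cleaned_text ++ ['.'] else cleaned_text
  String.ofList cleaned_text

-- ===== PRECONDITION & SPEC =====
def Spec_remove_dashes (text : String) (out : String) : Prop := out = remove_dashes_alt text
instance (text : String) (out : String) : Decidable (Spec_remove_dashes text out) := by unfold Spec_remove_dashes; infer_instance

-- ===== CLAIM (what is proved, stated in full; the proofs are below) =====
def Claim_equal_remove_dashes : Prop := ∀ (text : String), Dom_remove_dashes text → Spec_remove_dashes text (remove_dashes text)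

-- ===== LEMMAS AND PROOFS =====

-- prepend `pre` onto the first piece
def pvConsHead (pre : List Char) : List (List Char) → List (List Char)
  | [] => [pre]
  | p :: ps => (pre ++ p) :: ps

-- simple first-occurrence split on the fixed separator '. '
def pvSplit : List Char → List (List Char)
  | [] => [[]]
  | c :: rest =>
    if c = '.' ∧ rest.head? = some ' ' then [] :: pvSplit rest.tail
    else pvConsHead [c] (pvSplit rest)
termination_by l => l.length
decreasing_by all_goals simp [List.length_tail]

-- A's loop body
def pvStrip2 (p : List Char) : List Char :=
  if PySem.Chars.startswith p ['-', ' '] then PySem.Chars.slice p (some 2) none else p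

def pvPieces (st : Bool) : List (List Char) → List (List Char)
  | [] => []
  | p :: ps => (if st then pvStrip2 p else p) :: ps.map pvStrip2

theorem pvConsHead_ne_nil (pre : List Char) (ps : List (List Char)) : pvConsHead pre ps ≠ [] := by
  cases ps <;> simp [pvConsHead]

theorem pvConsHead_consHead (a b : List Char) (ps : List (List Char)) :
    pvConsHead a (pvConsHead b ps) = pvConsHead (a ++ b) ps := by
  cases ps <;> simp [pvConsHead]

theorem pvConsHead_nil_eq (ps : List (List Char)) (h : ps ≠ []) : pvConsHead [] ps = ps := by
  cases ps with
  | nil => exact absurd rfl h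
  | cons p ps => simp [pvConsHead]

theorem pvJoin_one (a b : List Char) : PySem.Chars.join a [b] = b := by
  simp [PySem.Chars.join, List.intercalate]

theorem pvJoin_cons (a b c : List Char) (xs : List (List Char)) :
    PySem.Chars.join a (b :: c :: xs) = b ++ a ++ PySem.Chars.join a (c :: xs) := by
  simp [PySem.Chars.join, List.intercalate, List.intersperse]

theorem pvStarts_dot (c : Char) (rest : List Char) :
    (PySem.Chars.startswith (c :: rest) ['.', ' '] = true) ↔ (c = '.' ∧ rest.head? = some ' ') := by
  cases rest <;> simp [PySem.Chars.startswith, List.isPrefixOf] <;> try aesop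

theorem pvStarts_dash (c : Char) (rest : List Char) :
    (PySem.Chars.startswith (c :: rest) ['-', ' '] = true) ↔ (c = '-' ∧ rest.head? = some ' ') := by
  cases rest <;> simp [PySem.Chars.startswith, List.isPrefixOf] <;> try aesop

theorem pvSplit_nil : pvSplit [] = [[]] := by simp [pvSplit]

theorem pvSplit_cons (c : Char) (rest : List Char) :
    pvSplit (c :: rest) =
      if c = '.' ∧ rest.head? = some ' ' then [] :: pvSplit rest.tail
      else pvConsHead [c] (pvSplit rest) := by
  rw [pvSplit]

theorem pvSplit_ne_nil (l : List Char) : pvSplit l ≠ [] := by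
  cases l with
  | nil => simp [pvSplit_nil]
  | cons c rest =>
    rw [pvSplit_cons]
    split_ifs
    · simp
    · exact pvConsHead_ne_nil _ _

theorem pvSplit_head_prefix (l : List Char) (p : List Char) (ps : List (List Char))
    (h : pvSplit l = p :: ps) : p <+: l := by
  induction l generalizing p ps with
  | nil =>
    rw [pvSplit_nil] at h
    obtain ⟨rfl, rfl⟩ := List.cons.injEq .. ▸ h
    exact List.nil_prefix
  | cons c rest ih =>
    rw [pvSplit_cons] at h
    split_ifs at h
    · obtain ⟨rfl, rfl⟩ := List.cons.injEq .. ▸ h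
      exact List.nil_prefix
    · cases hr : pvSplit rest with
      | nil => exact absurd hr (pvSplit_ne_nil rest)
      | cons p0 ps0 =>
        rw [hr] at h
        simp only [pvConsHead, List.cons_append, List.nil_append] at h
        obtain ⟨rfl, rfl⟩ := List.cons.injEq .. ▸ h
        exact List.cons_prefix_cons.mpr ⟨rfl, ih p0 ps0 hr⟩

theorem pvGo_nil (fuel : Nat) (cur : List Char) (acc : List (List Char)) :
    PySem.Chars.splitOn.go ['.', ' '] (fuel + 1) [] cur acc = (cur.reverse :: acc).reverse := by
  rw [PySem.Chars.splitOn.go]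
  omega

theorem pvGo_cons (fuel : Nat) (c : Char) (rest cur : List Char) (acc : List (List Char)) :
    PySem.Chars.splitOn.go ['.', ' '] (fuel + 1) (c :: rest) cur acc =
      if List.isPrefixOf ['.', ' '] (c :: rest) = true then
        PySem.Chars.splitOn.go ['.', ' '] fuel (List.drop 2 (c :: rest)) [] (cur.reverse :: acc)
      else PySem.Chars.splitOn.go ['.', ' '] fuel rest (c :: cur) acc := by
  rw [PySem.Chars.splitOn.go]
  norm_num

theorem pvGo_spec (fuel : Nat) : ∀ (l cur : List Char) (acc : List (List Char)),
    l.length < fuel →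
    PySem.Chars.splitOn.go ['.', ' '] fuel l cur acc
      = acc.reverse ++ pvConsHead cur.reverse (pvSplit l) := by
  induction fuel with
  | zero => intro l cur acc h; omega
  | succ fuel ih =>
    intro l cur acc h
    cases l with
    | nil =>
      rw [pvGo_nil, pvSplit_nil]
      simp [pvConsHead]
    | cons c rest =>
      rw [pvGo_cons]
      by_cases hp : List.isPrefixOf ['.', ' '] (c :: rest) = true
      · have hps : c = '.' ∧ rest.head? = some ' ' :=
          (pvStarts_dot c rest).mp (by simpa [PySem.Chars.startswith] using hp)
        rw [if_pos hp]
        obtain ⟨rfl, hh⟩ := hps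
        obtain ⟨t, rfl⟩ : ∃ t, rest = ' ' :: t := by
          cases rest with
          | nil => simp at hh
          | cons r t => simp at hh; exact ⟨t, by rw [hh]⟩
        have hlen : t.length < fuel := by simp at h ⊢; omega
        rw [show List.drop 2 ('.' :: ' ' :: t) = t from rfl]
        rw [ih t [] (cur.reverse :: acc) hlen]
        rw [pvSplit_cons]
        rw [if_pos (by simp : ('.' : Char) = '.' ∧ (' ' :: t).head? = some ' ')]
        rw [List.tail_cons]
        rw [show (([] : List Char)).reverse = [] from rfl,
            pvConsHead_nil_eq _ (pvSplit_ne_nil t)]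
        cases hsp : pvSplit t with
        | nil => exact absurd hsp (pvSplit_ne_nil t)
        | cons p0 ps0 => simp [pvConsHead]
      · rw [if_neg hp]
        have hlen : rest.length < fuel := by simp at h; omega
        rw [ih rest (c :: cur) acc hlen]
        rw [pvSplit_cons]
        have hcond : ¬ (c = '.' ∧ rest.head? = some ' ') := by
          intro hc
          exact hp (by simpa [PySem.Chars.startswith] using (pvStarts_dot c rest).mpr hc)
        rw [if_neg hcond, pvConsHead_consHead]
        simp

theorem pvSplitOn_eq (l : List Char) : PySem.Chars.splitOn l ['.', ' '] = pvSplit l := by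
  rw [PySem.Chars.splitOn]
  rw [pvGo_spec (l.length + 1) l [] [] (by omega)]
  simp [pvConsHead_nil_eq _ (pvSplit_ne_nil l)]

theorem pvPieces_true (ps : List (List Char)) : pvPieces true ps = ps.map pvStrip2 := by
  cases ps <;> simp [pvPieces]

theorem pvScanB_cons (st : Bool) (c : Char) (rest : List Char) :
    pvScanB st (c :: rest) =
      if st && PySem.Chars.startswith (c :: rest) ['-', ' '] then
        pvScanB false rest.tail
      else if PySem.Chars.startswith (c :: rest) ['.', ' '] then
        '.' :: ' ' :: pvScanB true rest.tail
      else
        c :: pvScanB false rest := by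
  rw [pvScanB]

theorem pvStrip2_nil : pvStrip2 [] = [] := by
  simp [pvStrip2, PySem.Chars.startswith, List.isPrefixOf]

theorem pvScan_spec (st : Bool) (l : List Char) :
    pvScanB st l = PySem.Chars.join ['.', ' '] (pvPieces st (pvSplit l)) := by
  induction st, l using pvScanB.induct with
  | case1 st =>
    rw [pvSplit_nil]
    simp [pvScanB, pvPieces, pvStrip2_nil, PySem.Chars.join, List.intercalate]
  | case2 st c rest hdash ih =>
    obtain ⟨hst, hd⟩ := Bool.and_eq_true_iff.mp hdash
    obtain ⟨rfl, hh⟩ := (pvStarts_dash c rest).mp hd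
    obtain ⟨t, rfl⟩ : ∃ t, rest = ' ' :: t := by
      cases rest with
      | nil => simp at hh
      | cons r t => simp at hh; exact ⟨t, by rw [hh]⟩
    rw [pvScanB_cons, if_pos hdash, List.tail_cons]
    simp only [List.tail_cons] at ih
    subst hst
    rw [pvSplit_cons, if_neg (by simp), pvSplit_cons, if_neg (by simp)]
    cases hsp : pvSplit t with
    | nil => exact absurd hsp (pvSplit_ne_nil t)
    | cons p0 ps0 =>
      rw [hsp] at ih
      simp only [pvConsHead, List.cons_append, List.nil_append, pvPieces]
      rw [show pvStrip2 ('-' :: ' ' :: p0) = p0 by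
        simp [pvStrip2, PySem.Chars.startswith, List.isPrefixOf, PySem.List.slice_from]]
      exact ih
  | case3 st c rest hdash hdot ih =>
    obtain ⟨rfl, hh⟩ := (pvStarts_dot c rest).mp hdot
    obtain ⟨t, rfl⟩ : ∃ t, rest = ' ' :: t := by
      cases rest with
      | nil => simp at hh
      | cons r t => simp at hh; exact ⟨t, by rw [hh]⟩
    rw [pvScanB_cons, if_neg hdash, if_pos hdot, List.tail_cons]
    simp only [List.tail_cons] at ih
    rw [pvSplit_cons, if_pos (by simp), List.tail_cons]
    cases hsp : pvSplit t with
    | nil => exact absurd hsp (pvSplit_ne_nil t)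
    | cons p0 ps0 =>
      rw [hsp] at ih
      simp only [pvPieces, pvStrip2_nil]
      rw [List.map_cons, pvJoin_cons, ih, pvPieces_true]
      simp
  | case4 st c rest hdash hdot ih =>
    rw [pvScanB_cons, if_neg hdash, if_neg hdot]
    have hcond : ¬ (c = '.' ∧ rest.head? = some ' ') := fun hc =>
      hdot ((pvStarts_dot c rest).mpr hc)
    rw [pvSplit_cons, if_neg hcond]
    cases hsp : pvSplit rest with
    | nil => exact absurd hsp (pvSplit_ne_nil rest)
    | cons p0 ps0 =>
      rw [hsp] at ih
      simp only [pvConsHead, List.cons_append, List.nil_append, pvPieces]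
      have hfirst : (if st = true then pvStrip2 (c :: p0) else c :: p0) = c :: p0 := by
        by_cases hst : st = true
        · rw [hst]
          simp only [if_true]
          have hnost : PySem.Chars.startswith (c :: p0) ['-', ' '] = false := by
            rw [Bool.eq_false_iff]
            intro hpre
            obtain ⟨rfl, hh0⟩ := (pvStarts_dash c p0).mp hpre
            apply hdash
            rw [hst]
            simp only [Bool.true_and]
            refine (pvStarts_dash '-' rest).mpr ⟨rfl, ?_⟩
            have hpref := pvSplit_head_prefix rest p0 ps0 hsp
            cases p0 with
            | nil => simp at hh0
            | cons q t0 =>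
              simp at hh0
              obtain ⟨s, rfl⟩ := hpref
              simp [hh0]
          simp [pvStrip2, hnost]
        · simp [hst]
      rw [hfirst]
      simp only [pvPieces, Bool.false_eq_true, if_false] at ih
      cases hps0 : ps0.map pvStrip2 with
      | nil =>
        rw [hps0] at ih
        rw [pvJoin_one, ih, pvJoin_one]
      | cons q qs =>
        rw [hps0] at ih
        rw [pvJoin_cons, ih, pvJoin_cons]
        simp

theorem pvFoldl_map (f : List Char → List Char) (xs : List (List Char)) (acc : List (List Char)) :
    (xs.foldl (fun acc sentence => acc ++ [f sentence]) acc) = acc ++ xs.map f := by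
  induction xs generalizing acc with
  | nil => simp
  | cons x xs ih => simp [List.foldl_cons, ih]

-- ===== VERDICT (by name: the statement is the Claim_ definition above) =====
theorem remove_dashes_spec : Claim_equal_remove_dashes := by
  intro text _
  unfold Spec_remove_dashes remove_dashes remove_dashes_alt
  simp only [pvSplitOn_eq, pvScan_spec, pvPieces_true]
  rw [pvFoldl_map (fun sentence =>
    if PySem.Chars.startswith sentence ['-', ' '] = true then
      PySem.Chars.slice sentence (some 2) none
    else sentence) (pvSplit text.toList) []]
  have hf : (fun sentence => if PySem.Chars.startswith sentence ['-', ' '] = true then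
      PySem.Chars.slice sentence (some 2) none else sentence) = pvStrip2 := by
    funext p
    rw [pvStrip2]
  rw [hf]
  simp
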